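-- pv_equiv track=rewrite | github.com/genomehubs/genomehubs | src/genomehubs/lib/fill.py | mode_list
-- ===== SOURCE A (Python) =====
-- from itertools import groupby
--
-- def mode_list(arr):
--     """Return a list of modal values."""
--     mode_count = 0
--     mode_arr = []
--     for key, group in groupby(arr):
--         count = len(list(group))
--         if count < mode_count:
--             continue
--         if count > mode_count:
--             mode_count = count
--             mode_arr = []
--         mode_arr.append(key)
--     return mode_arr
-- ===== SOURCE B (Python) =====
-- def mode_list(arr):
--     """Return a list of modal values."""
--     n = len(arr)
--     starts = [i for i in range(n) if i == 0 or arr[i] != arr[i - 1]]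
--     ends = starts[1:] + [n]
--     m = max((e - s for s, e in zip(starts, ends)), default=0)
--     return [arr[s] for s, e in zip(starts, ends) if e - s == m]
-- ===== Notes on version B (the rewrite author's own statement) =====
-- stated objective: alternative
-- what changed: B drops groupby and run counting entirely: it collects the run-boundary indices with an index filter, derives each run length by differencing consecutive boundaries, and selects the keys of maximal-difference runs.
import Mathlib
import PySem

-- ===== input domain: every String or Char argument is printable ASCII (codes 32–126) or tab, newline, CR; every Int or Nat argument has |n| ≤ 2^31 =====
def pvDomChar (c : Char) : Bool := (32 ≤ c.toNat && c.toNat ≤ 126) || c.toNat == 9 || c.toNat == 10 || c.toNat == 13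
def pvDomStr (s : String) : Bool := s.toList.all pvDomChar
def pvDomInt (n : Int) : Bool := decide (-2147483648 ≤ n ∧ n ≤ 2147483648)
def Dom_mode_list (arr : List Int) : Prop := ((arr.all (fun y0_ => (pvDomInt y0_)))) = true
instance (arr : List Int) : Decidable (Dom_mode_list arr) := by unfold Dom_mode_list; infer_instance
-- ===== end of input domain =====

-- B removes groupby and run counting: it finds run-boundary indices by an index filter, gets run
-- lengths by differencing consecutive boundaries, and keeps the keys of maximal-difference runs.

-- ===== PORT A =====
-- itertools.groupby over the list, as (key, run-length) pairs
def pyGroupby (k : Int) (c : Int) : List Int → List (Int × Int)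
  | [] => [(k, c)]
  | x :: xs => if x = k then pyGroupby k (c + 1) xs else (k, c) :: pyGroupby x 1 xs

def pyRuns : List Int → List (Int × Int)
  | [] => []
  | x :: xs => pyGroupby x 1 xs

-- A: one pass over the groups carrying (mode_count, mode_arr); continue / reset / append in that branch order
def mode_list (arr : List Int) : List Int :=
  (pyRuns arr |>.foldl
    (fun st kg =>
      let count := kg.2
      if count < st.1 then st
      else if count > st.1 then (count, [kg.1])
      else (st.1, st.2 ++ [kg.1]))
    ((0 : Int), ([] : List Int))).2

-- ===== PORT B =====
-- [i for i in range(n) if i == 0 or arr[i] != arr[i-1]]; getD is exact here: Python's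
-- short-circuit `or` guarantees both indexings happen only with 0 <= i-1 < i < n.
def bStarts (arr : List Int) : List Nat :=
  (List.range arr.length).filter (fun i => i == 0 || !(arr.getD i 0 == arr.getD (i - 1) 0))

-- zip(starts, ends) with ends = starts[1:] + [n]
def bPairs (arr : List Int) : List (Nat × Nat) :=
  (bStarts arr).zip ((bStarts arr).drop 1 ++ [arr.length])

-- B: boundary indices, lengths by differencing, max (Python's default=0), filter the pairs
def mode_list_alt (arr : List Int) : List Int :=
  let pairs := bPairs arr
  let m := (pairs.map (fun p => (p.2 : Int) - (p.1 : Int))).foldl max 0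
  (pairs.filter (fun p => (p.2 : Int) - (p.1 : Int) = m)).map (fun p => arr.getD p.1 0)

-- ===== PRECONDITION & SPEC =====
def Spec_mode_list (arr : List Int) (out : List Int) : Prop := out = mode_list_alt arr
instance (arr : List Int) (out : List Int) : Decidable (Spec_mode_list arr out) := by unfold Spec_mode_list; infer_instance

-- ===== CLAIM (what is proved, stated in full; the proofs are below) =====
def Claim_equal_mode_list : Prop := ∀ (arr : List Int), Dom_mode_list arr → Spec_mode_list arr (mode_list arr)

-- ===== LEMMAS AND PROOFS =====

theorem le_foldl_max (mc : Int) (l : List Int) : mc ≤ l.foldl max mc := by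
  induction l generalizing mc with
  | nil => simp
  | cons x xs ih => exact le_trans (le_max_left mc x) (ih (max mc x))

-- loop invariant for A's fold, generalised over the carried state
theorem foldA_eq (rs : List (Int × Int)) (mc : Int) (ma : List Int) :
    (rs.foldl
      (fun st kg =>
        let count := kg.2
        if count < st.1 then st
        else if count > st.1 then (count, [kg.1])
        else (st.1, st.2 ++ [kg.1]))
      (mc, ma)) =
    ((rs.map Prod.snd).foldl max mc,
     (if (rs.map Prod.snd).foldl max mc = mc then ma else []) ++
       (rs.filter (fun p => p.2 = (rs.map Prod.snd).foldl max mc)).map Prod.fst) := by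
  induction rs generalizing mc ma with
  | nil => simp
  | cons kg rs ih =>
    obtain ⟨k, c⟩ := kg
    simp only [List.foldl_cons, List.map_cons, List.filter_cons]
    by_cases h1 : c < mc
    · have hmax : max mc c = mc := by omega
      rw [if_pos h1, ih]
      simp only [hmax]
      have hM : mc ≤ (rs.map Prod.snd).foldl max mc := le_foldl_max _ _
      have : ¬ (c = (rs.map Prod.snd).foldl max mc) := by omega
      simp [this]
    · by_cases h2 : c > mc
      · have hmax : max mc c = c := by omega
        rw [if_neg h1, if_pos h2, ih]
        simp only [hmax]
        have hM : c ≤ (rs.map Prod.snd).foldl max c := le_foldl_max _ _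
        have hne : ¬ ((rs.map Prod.snd).foldl max c = mc) := by omega
        simp only [hne, if_false]
        by_cases h3 : c = (rs.map Prod.snd).foldl max c
        · simp [← h3]
        · simp [h3, Ne.symm h3]
      · have hceq : c = mc := by omega
        subst hceq
        rw [if_neg h1, if_neg h2]
        simp only [max_self]
        rw [ih]
        by_cases h3 : (rs.map Prod.snd).foldl max c = c
        · simp [h3]
        · simp [h3, Ne.symm h3]

-- proof-side helpers for B's boundary structure

-- inner boundary filter after peeling one element
def bInner (x : Int) (xs : List Int) : List Nat :=
  (List.range xs.length).filter (fun i => !(xs.getD i 0 == (x :: xs).getD i 0))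

def chainPairs (s : Nat) : List Nat → Nat → List (Nat × Nat)
  | [], c => [(s, c)]
  | a :: A, c => (s, a) :: chainPairs a A c

def bumpHead : List (Int × Int) → List (Int × Int)
  | [] => []
  | (k, c) :: t => (k, c + 1) :: t

def Fm (arr : List Int) (p : Nat × Nat) : Int × Int :=
  (arr.getD p.1 0, (p.2 : Int) - (p.1 : Int))

theorem pyGroupby_bump (ys : List Int) (k : Int) (c : Int) :
    pyGroupby k (c + 1) ys = bumpHead (pyGroupby k c ys) := by
  induction ys generalizing k c with
  | nil => simp [pyGroupby, bumpHead]
  | cons z zs ih =>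
    by_cases h : z = k
    · simp only [pyGroupby, if_pos h]
      exact ih k (c + 1)
    · simp [pyGroupby, h, bumpHead]

theorem bStarts_cons (x : Int) (xs : List Int) :
    bStarts (x :: xs) = 0 :: (bInner x xs).map (· + 1) := by
  unfold bStarts bInner
  simp only [List.length_cons, List.range_succ_eq_map, List.filter_cons]
  simp [List.filter_map, Function.comp_def]

theorem bInner_cons (x y : Int) (ys : List Int) :
    bInner x (y :: ys) =
      (if x == y then [] else [0]) ++ (bInner y ys).map (· + 1) := by
  unfold bInner
  simp only [List.length_cons, List.range_succ_eq_map, List.filter_cons]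
  have htail :
      (List.filter (fun i => !((y :: ys).getD i 0 == (x :: y :: ys).getD i 0))
          ((List.range ys.length).map Nat.succ)) =
      ((List.range ys.length).filter (fun i => !(ys.getD i 0 == (y :: ys).getD i 0))).map (· + 1) := by
    simp [List.filter_map, Function.comp_def]
  rw [htail]
  by_cases h : x = y
  · simp [h]
  · simp [h, Ne.symm h]

theorem zip_chainPairs (A : List Nat) (s c : Nat) :
    (s :: A).zip (A ++ [c]) = chainPairs s A c := by
  induction A generalizing s with
  | nil => simp [chainPairs]
  | cons a A ih => simp [chainPairs, ih a]

-- shift lemma: mapping over a chain of incremented boundaries equals mapping the base chain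
theorem chain_shift (B : List Nat) (s c : Nat) (f g : Nat × Nat → Int × Int)
    (hfg : ∀ i j, f (i + 1, j + 1) = g (i, j)) :
    (chainPairs (s + 1) (B.map (· + 1)) (c + 1)).map f = (chainPairs s B c).map g := by
  induction B generalizing s with
  | nil => simp [chainPairs, hfg s c]
  | cons b B ih => simp [chainPairs, hfg s b, ih b]

theorem Fm_shift (x : Int) (xs : List Int) :
    ∀ i j, Fm (x :: xs) (i + 1, j + 1) = Fm xs (i, j) := by
  intro i j
  simp only [Fm, List.getD_cons_succ]
  congr 1
  push_cast
  ring

-- main bridge: B's boundary pairs, mapped to (key, length), are exactly the groupby runs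
theorem chain_runs (xs : List Int) (x : Int) :
    (chainPairs 0 ((bInner x xs).map (· + 1)) (xs.length + 1)).map (Fm (x :: xs)) =
      pyRuns (x :: xs) := by
  induction xs generalizing x with
  | nil => simp [bInner, chainPairs, Fm, pyRuns, pyGroupby]
  | cons y ys ih =>
    rw [bInner_cons]
    by_cases h : x = y
    · -- head run grows by one: the first pair's difference bumps
      simp only [h, beq_self_eq_true, if_pos, List.nil_append]
      have hruns : pyRuns (y :: y :: ys) = bumpHead (pyRuns (y :: ys)) := by
        simp only [pyRuns, pyGroupby, if_pos]
        exact pyGroupby_bump ys y 1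
      rw [hruns, ← ih y]
      cases hB : (bInner y ys).map (· + 1) with
      | nil =>
        simp only [List.map_nil, chainPairs, List.map_cons, Fm, List.getD_cons_zero,
          List.length_cons, bumpHead]
        congr 2
      | cons b B =>
        have hsh : (chainPairs (b + 1) (B.map (· + 1)) (ys.length + 1 + 1)).map (Fm (y :: y :: ys)) =
            (chainPairs b B (ys.length + 1)).map (Fm (y :: ys)) :=
          chain_shift B b (ys.length + 1) _ _ (Fm_shift y (y :: ys))
        simp only [List.length_cons] at hsh ⊢
        simp only [List.map_cons, chainPairs, List.map_cons]
        rw [hsh]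
        simp only [Fm, List.getD_cons_zero, bumpHead]
        congr 2
    · -- new head run of length one
      have hb : (x == y) = false := by simp [h]
      simp only [hb, if_neg, Bool.false_eq_true, not_false_iff, List.singleton_append, List.map_cons]
      simp only [chainPairs, List.map_cons]
      have hsh : (chainPairs (0 + 1) (((bInner y ys).map (· + 1)).map (· + 1)) (ys.length + 1 + 1)).map (Fm (x :: y :: ys)) =
          (chainPairs 0 ((bInner y ys).map (· + 1)) (ys.length + 1)).map (Fm (y :: ys)) :=
        chain_shift _ 0 (ys.length + 1) _ _ (Fm_shift x (y :: ys))
      simp only [List.length_cons] at hsh ⊢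
      rw [show (0 : Nat) + 1 = 1 from rfl] at hsh
      rw [hsh, ih y]
      have h' : y ≠ x := fun e => h e.symm
      simp [pyRuns, pyGroupby, h', Fm]

theorem bPairs_map_runs (arr : List Int) :
    (bPairs arr).map (Fm arr) = pyRuns arr := by
  cases arr with
  | nil => simp [bPairs, bStarts, pyRuns]
  | cons x xs =>
    unfold bPairs
    rw [bStarts_cons]
    simp only [List.drop_succ_cons, List.drop_zero, List.length_cons]
    rw [zip_chainPairs]
    exact chain_runs xs x

-- transport B's filter+map along bPairs_map_runs, for an arbitrary threshold M
theorem bFilter_eq (arr : List Int) (M : Int) :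
    ((bPairs arr).filter (fun p => (p.2 : Int) - (p.1 : Int) = M)).map (fun p => arr.getD p.1 0) =
      ((pyRuns arr).filter (fun p => p.2 = M)).map Prod.fst := by
  rw [← bPairs_map_runs arr, List.filter_map, List.map_map]
  rfl

-- B computed on the runs: its max and filter transport along bPairs_map_runs
theorem mode_list_alt_eq_runs (arr : List Int) :
    mode_list_alt arr =
      ((pyRuns arr).filter (fun p => p.2 = (((pyRuns arr).map Prod.snd).foldl max 0))).map Prod.fst := by
  have hdef : mode_list_alt arr =
      ((bPairs arr).filter (fun p => (p.2 : Int) - (p.1 : Int) =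
          ((bPairs arr).map (fun p => (p.2 : Int) - (p.1 : Int))).foldl max 0)).map
        (fun p => arr.getD p.1 0) := rfl
  have hmap := bPairs_map_runs arr
  have hm : ((bPairs arr).map (fun p => (p.2 : Int) - (p.1 : Int))).foldl max 0 =
      ((pyRuns arr).map Prod.snd).foldl max 0 := by
    rw [← hmap, List.map_map]
    rfl
  rw [hdef, hm, bFilter_eq]

-- ===== VERDICT (by name: the statement is the Claim_ definition above) =====
theorem mode_list_spec : Claim_equal_mode_list := by
  intro arr _
  unfold Spec_mode_list mode_list
  rw [foldA_eq, mode_list_alt_eq_runs]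
  split_ifs with h <;> simp
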